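-- pv_equiv track=rewrite | github.com/abhikrish06/PythonPractice | LC_n_Misc/Goog_cd_jm_trble_sort.py | troubleSort
-- ===== SOURCE A (Python) =====
-- def troubleSort(lst):
--     val = False
--     while not val:
--         val = True
--         for i in range(len(lst)- 2):
--             if lst[i]>lst[i+2]:
--                 val = False
--                 lst[i], lst[i + 2] = lst[i+2], lst[i]
--     return lst
-- ===== SOURCE B (Python) =====
-- def troubleSort(lst):
--     # Sort the even-indexed and odd-indexed subsequences independently.
--     # Adjacent-by-2 swaps can only permute within each parity class, and
--     # A's loop runs until each class is in order, so this is the fixpoint.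
--     lst[::2] = sorted(lst[::2])
--     lst[1::2] = sorted(lst[1::2])
--     return lst
-- ===== Notes on version B (the rewrite author's own statement) =====
-- stated objective: faster
-- what changed: Replaces the repeated quadratic bubble passes over stride-2 pairs with one pass that sorts the even-indexed and odd-indexed subsequences independently and writes them back in place.
import Mathlib
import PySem

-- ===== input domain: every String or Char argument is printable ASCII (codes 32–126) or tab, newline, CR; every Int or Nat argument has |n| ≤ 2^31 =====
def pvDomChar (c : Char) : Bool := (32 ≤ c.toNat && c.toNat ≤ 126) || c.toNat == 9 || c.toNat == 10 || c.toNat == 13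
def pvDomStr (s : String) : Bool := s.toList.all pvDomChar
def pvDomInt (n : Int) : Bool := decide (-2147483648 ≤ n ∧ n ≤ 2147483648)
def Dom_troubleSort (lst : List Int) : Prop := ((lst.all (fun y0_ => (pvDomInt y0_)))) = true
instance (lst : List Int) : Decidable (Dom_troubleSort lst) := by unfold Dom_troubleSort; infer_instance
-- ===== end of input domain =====

-- B sorts the even- and odd-indexed subsequences separately instead of A's repeated
-- stride-2 bubble passes (faster). Both Pythons mutate lst in place the same way;
-- the theorems below are about the returned value.

-- ===== PORT A =====
-- `for i in range(len(lst)-2): if lst[i] > lst[i+2]: swap` as structural recursion on the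
-- list: each step compares the 1st and 3rd element of the remaining suffix (= lst[i], lst[i+2])
-- and swaps them; recursing on the tail advances i by one. Exact step-for-step transliteration.
def pvPass : List Int → List Int × Bool
  | a :: b :: c :: t =>
    if a > c then
      let r := pvPass (b :: a :: t)
      (c :: r.1, false)
    else
      let r := pvPass (b :: c :: t)
      (a :: r.1, r.2)
  | l => (l, true)
termination_by l => l.length
decreasing_by all_goals simp

-- even-indexed / odd-indexed elements (lst[::2] and lst[1::2])
mutual
def pvEvens : List Int → List Int
  | [] => []
  | a :: t => a :: pvOdds t
def pvOdds : List Int → List Int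
  | [] => []
  | _ :: t => pvEvens t
end

-- inversion count of a list, and its sum over the two parity chains
def pvInv : List Int → Nat
  | [] => 0
  | a :: t => t.countP (fun x => decide (x < a)) + pvInv t

def pvMu (l : List Int) : Nat := pvInv (pvEvens l) + pvInv (pvOdds l)

-- A's `while not val` loop, made total by fuel: pvMu strictly decreases on every pass that
-- swaps (proved below), so pvMu lst + 1 passes always suffice; the fuel only makes the same
-- computation total and is never exhausted.
def pvLoop : Nat → List Int → List Int
  | 0, l => l
  | n + 1, l =>
    match pvPass l with
    | (l', true) => l'
    | (l', false) => pvLoop n l'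

def troubleSort (lst : List Int) : List Int := pvLoop (pvMu lst + 1) lst

-- ===== PORT B =====
-- the two slice assignments lst[::2] = sorted(lst[::2]); lst[1::2] = sorted(lst[1::2])
-- produce exactly the interleaving of the two sorted parity subsequences
def pvIlv : List Int → List Int → List Int
  | [], ys => ys
  | x :: xs, ys => x :: pvIlv ys xs
termination_by xs ys => xs.length + ys.length
decreasing_by simp; omega

def troubleSort_alt (lst : List Int) : List Int :=
  pvIlv (PySem.List.sorted (pvEvens lst) (fun x => x))
        (PySem.List.sorted (pvOdds lst) (fun x => x))

-- ===== PRECONDITION & SPEC =====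
def Spec_troubleSort (lst : List Int) (out : List Int) : Prop := out = troubleSort_alt lst
instance (lst : List Int) (out : List Int) : Decidable (Spec_troubleSort lst out) := by unfold Spec_troubleSort; infer_instance

-- ===== CLAIM (what is proved, stated in full; the proofs are below) =====
def Claim_equal_troubleSort : Prop := ∀ (lst : List Int), Dom_troubleSort lst → Spec_troubleSort lst (troubleSort lst)

-- ===== LEMMAS AND PROOFS =====

-- one bubble pass over a single parity chain (proof device only)
def pvBp : List Int → List Int × Bool
  | a :: b :: t =>
    if a > b then (b :: (pvBp (a :: t)).1, false)
    else (a :: (pvBp (b :: t)).1, (pvBp (b :: t)).2)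
  | l => (l, true)
termination_by l => l.length
decreasing_by all_goals simp

theorem pvBp_perm : ∀ l : List Int, (pvBp l).1.Perm l := by
  intro l
  induction l using pvBp.induct with
  | case1 a b t h ih => rw [pvBp]; simp [h]; exact (ih.cons b).trans (List.Perm.swap a b t)
  | case2 a b t h ih => rw [pvBp]; simp [h]; exact ih
  | case3 l h =>
    rw [pvBp.eq_def]
    match l, h with
    | [], _ => simp
    | [a], _ => simp
    | a :: b :: t, h => exact absurd rfl (h a b t)

theorem pvBp_true : ∀ l : List Int, (pvBp l).2 = true → (pvBp l).1 = l ∧ List.Pairwise (· ≤ ·) l := by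
  intro l
  induction l using pvBp.induct with
  | case1 a b t h ih => rw [pvBp]; simp [h]
  | case2 a b t h ih =>
    rw [pvBp]; simp only [h, if_false]
    intro hv
    obtain ⟨h1, h2⟩ := ih hv
    rw [h1]
    refine ⟨rfl, List.pairwise_cons.mpr ⟨?_, h2⟩⟩
    intro x hx
    rcases List.mem_cons.mp hx with rfl | hx
    · omega
    · exact le_trans (by omega : a ≤ b) ((List.pairwise_cons.mp h2).1 x hx)
  | case3 l h =>
    rw [pvBp.eq_def]
    match l, h with
    | [], _ => simp
    | [a], _ => simp
    | a :: b :: t, h => exact absurd rfl (h a b t)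

theorem pvBp_inv : ∀ l : List Int,
    pvInv (pvBp l).1 ≤ pvInv l ∧ ((pvBp l).2 = false → pvInv (pvBp l).1 < pvInv l) := by
  intro l
  induction l using pvBp.induct with
  | case1 a b t h ih =>
    obtain ⟨ih1, -⟩ := ih
    rw [pvBp]; simp only [h, if_true]
    have hperm : ((pvBp (a :: t)).1).countP (fun x => decide (x < b)) =
        (a :: t).countP (fun x => decide (x < b)) := (pvBp_perm (a :: t)).countP_eq _
    have e1 : pvInv (b :: (pvBp (a :: t)).1) =
        t.countP (fun x => decide (x < b)) + pvInv (pvBp (a :: t)).1 := by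
      simp [pvInv, hperm, show ¬ (a < b) by omega]
    have e2 : pvInv (a :: b :: t) =
        (t.countP (fun x => decide (x < a)) + 1) + (t.countP (fun x => decide (x < b)) + pvInv t) := by
      simp [pvInv, show b < a by omega]
    have e3 : pvInv (a :: t) = t.countP (fun x => decide (x < a)) + pvInv t := by simp [pvInv]
    rw [e3] at ih1
    constructor
    · simp only [e1, e2]; omega
    · intro _; simp only [e1, e2]; omega
  | case2 a b t h ih =>
    obtain ⟨ih1, ih2⟩ := ih
    rw [pvBp]; simp only [h, if_false]
    have hperm : ((pvBp (b :: t)).1).countP (fun x => decide (x < a)) =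
        (b :: t).countP (fun x => decide (x < a)) := (pvBp_perm (b :: t)).countP_eq _
    have e1 : pvInv (a :: (pvBp (b :: t)).1) =
        (b :: t).countP (fun x => decide (x < a)) + pvInv (pvBp (b :: t)).1 := by
      simp [pvInv, hperm]
    have e2 : pvInv (a :: b :: t) = (b :: t).countP (fun x => decide (x < a)) + pvInv (b :: t) := by
      simp [pvInv, List.countP_cons]
    constructor
    · simp only [e1, e2]; omega
    · intro hv; have := ih2 hv; simp only [e1, e2]; omega
  | case3 l h =>
    rw [pvBp.eq_def]
    match l, h with
    | [], _ => simp
    | [a], _ => simp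
    | a :: b :: t, h => exact absurd rfl (h a b t)

theorem pvPass_chain : ∀ l : List Int,
    pvEvens (pvPass l).1 = (pvBp (pvEvens l)).1 ∧
    pvOdds (pvPass l).1 = (pvBp (pvOdds l)).1 ∧
    (pvPass l).2 = ((pvBp (pvEvens l)).2 && (pvBp (pvOdds l)).2) := by
  intro l
  induction l using pvPass.induct with
  | case1 a b c t h ih =>
    obtain ⟨ih1, ih2, ih3⟩ := ih
    rw [pvPass]
    simp only [pvEvens, pvOdds] at ih1 ih2 ih3 ⊢
    simp only [h, if_true]
    refine ⟨?_, ih1, ?_⟩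
    · rw [pvBp]; simp only [h, if_true, pvEvens]; rw [ih2]
    · rw [pvBp]; simp [h]
  | case2 a b c t h ih =>
    obtain ⟨ih1, ih2, ih3⟩ := ih
    rw [pvPass]
    simp only [pvEvens, pvOdds] at ih1 ih2 ih3 ⊢
    simp only [h, if_false]
    refine ⟨?_, ih1, ?_⟩
    · rw [pvBp]; simp only [h, if_false, pvEvens]; rw [ih2]
    · rw [pvBp]; simp only [h, if_false]; rw [ih3, Bool.and_comm]
  | case3 l h =>
    match l, h with
    | [], _ => simp [pvPass, pvEvens, pvOdds, pvBp]
    | [a], _ => simp [pvPass, pvEvens, pvOdds, pvBp]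
    | [a, b], _ => simp [pvPass, pvEvens, pvOdds, pvBp]
    | a :: b :: c :: t, h => exact absurd rfl (h a b c t)

theorem pvIlv_evens_odds : ∀ l : List Int, pvIlv (pvEvens l) (pvOdds l) = l := by
  intro l
  induction l with
  | nil => simp [pvEvens, pvOdds, pvIlv]
  | cons a t ih => simp only [pvEvens, pvOdds, pvIlv]; rw [ih]

theorem pvLoop_eq : ∀ (n : Nat) (l : List Int), pvMu l < n →
    pvLoop n l = pvIlv (PySem.List.sorted (pvEvens l) (fun x => x))
                       (PySem.List.sorted (pvOdds l) (fun x => x)) := by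
  intro n
  induction n with
  | zero => intro l h; omega
  | succ m ih =>
    intro l hmu
    obtain ⟨c1, c2, c3⟩ := pvPass_chain l
    rw [pvLoop]
    rcases hp : pvPass l with ⟨l', v⟩
    rw [hp] at c1 c2 c3; simp only at c1 c2 c3
    cases v with
    | true =>
      have he := pvBp_true (pvEvens l) (by revert c3; cases (pvBp (pvEvens l)).2 <;> simp)
      have ho := pvBp_true (pvOdds l) (by revert c3; cases (pvBp (pvOdds l)).2 <;> simp)
      rw [PySem.List.sorted_eq_self_of_pairwise _ _ he.2, PySem.List.sorted_eq_self_of_pairwise _ _ ho.2]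
      rw [pvIlv_evens_odds]
      calc l' = pvIlv (pvEvens l') (pvOdds l') := (pvIlv_evens_odds l').symm
        _ = l := by rw [c1, c2, he.1, ho.1, pvIlv_evens_odds]
    | false =>
      have hfl : (pvBp (pvEvens l)).2 = false ∨ (pvBp (pvOdds l)).2 = false := by
        revert c3; cases (pvBp (pvEvens l)).2 <;> cases (pvBp (pvOdds l)).2 <;> simp
      have hmu' : pvMu l' < pvMu l := by
        have hE := pvBp_inv (pvEvens l)
        have hO := pvBp_inv (pvOdds l)
        unfold pvMu
        rw [c1, c2]
        rcases hfl with hf | hf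
        · have := hE.2 hf; omega
        · have := hO.2 hf; omega
      show pvLoop m l' = _
      rw [ih l' (by omega)]
      rw [PySem.List.sorted_eq_sorted_of_perm (pvEvens l') (pvEvens l) _ (fun _ _ h => h)
            (by rw [c1]; exact pvBp_perm _),
          PySem.List.sorted_eq_sorted_of_perm (pvOdds l') (pvOdds l) _ (fun _ _ h => h)
            (by rw [c2]; exact pvBp_perm _)]

-- ===== VERDICT (by name: the statement is the Claim_ definition above) =====
theorem troubleSort_spec : Claim_equal_troubleSort := by
  intro lst _
  show troubleSort lst = troubleSort_alt lst
  unfold troubleSort troubleSort_alt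
  exact pvLoop_eq (pvMu lst + 1) lst (Nat.lt_succ_self _)
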